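-- pv_equiv track=rewrite | github.com/szymeq17/Uni | Introduction to Python/Lista 7/zad4.py | spirala
-- ===== SOURCE A (Python) =====
-- def spirala(n):
--     s=''
--     while n>0:
--         for i in range(n):
--             if i%3 == 0:
--                 s+="gf"
--             elif i%3 == 1:
--                 s+="pf"
--             elif i%3 == 2:
--                 s+="cf"
--         n-=1
--         s+="r"
--     return s
-- ===== SOURCE B (Python) =====
-- def spirala(n):
--     base = "gfpfcf"
--     return "".join((base * (n - j))[:2 * (n - j)] + "r" for j in range(n))
-- ===== Notes on version B (the rewrite author's own statement) =====
-- stated objective: simpler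
-- what changed: Replaces A's per-cell if/elif modulo dispatch inside a nested while/for loop by a closed-form row: each row is a slice of the repeated unit string 'gfpfcf' ((base*(n-j))[:2*(n-j)] + 'r'), joined once at the end.
import Mathlib
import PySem

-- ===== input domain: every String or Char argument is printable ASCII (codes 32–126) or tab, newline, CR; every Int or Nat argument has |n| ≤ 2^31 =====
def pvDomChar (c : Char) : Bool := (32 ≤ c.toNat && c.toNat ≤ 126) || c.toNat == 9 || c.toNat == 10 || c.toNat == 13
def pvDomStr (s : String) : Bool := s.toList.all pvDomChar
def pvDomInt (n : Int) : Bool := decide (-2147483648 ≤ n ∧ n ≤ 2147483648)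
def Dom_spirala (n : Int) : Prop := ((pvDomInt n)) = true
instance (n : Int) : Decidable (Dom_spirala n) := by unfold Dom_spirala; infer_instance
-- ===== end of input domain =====

-- B replaces A's per-cell if/elif character loop by a closed-form slice of the repeated
-- pattern "gfpfcf" per row, joined at the end (objective: simpler row construction).

-- ===== PORT A =====
-- one step of A's inner 'for i in range(n)' body (string concatenation ported on List Char)
def spiralaCell (s : List Char) (i : Int) : List Char :=
  if PySem.Int.mod i 3 = 0 then s ++ ['g', 'f']
  else if PySem.Int.mod i 3 = 1 then s ++ ['p', 'f']
  else if PySem.Int.mod i 3 = 2 then s ++ ['c', 'f']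
  else s

-- A's 'while n > 0' loop
def spiralaGo (n : Int) (s : List Char) : List Char :=
  if _h : 0 < n then
    spiralaGo (n - 1) ((PySem.List.pyRange 0 n 1).foldl spiralaCell s ++ ['r'])
  else s
termination_by n.toNat
decreasing_by omega

def spirala (n : Int) : String := String.ofList (spiralaGo n [])

-- ===== PORT B =====
-- one row of B: ("gfpfcf" * m)[:2*m] + "r"  (string repetition = flatten of replicate)
def spiralaRowB (m : Int) : List Char :=
  PySem.List.slice ((List.replicate m.toNat ['g', 'f', 'p', 'f', 'c', 'f']).flatten)
    none (some (2 * m)) ++ ['r']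

-- '"".join( … for j in range(n))'
def spirala_alt (n : Int) : String :=
  String.ofList
    (PySem.Chars.join [] ((PySem.List.pyRange 0 n 1).map (fun j => spiralaRowB (n - j))))

-- ===== PRECONDITION & SPEC =====
def Spec_spirala (n : Int) (out : String) : Prop := out = spirala_alt n
instance (n : Int) (out : String) : Decidable (Spec_spirala n out) := by unfold Spec_spirala; infer_instance

-- ===== CLAIM (what is proved, stated in full; the proofs are below) =====
def Claim_equal_spirala : Prop := ∀ (n : Int), Dom_spirala n → Spec_spirala n (spirala n)

-- ===== LEMMAS AND PROOFS =====

-- proof-side model of one row of A, indexed by a Nat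
def cellN (k : Nat) : List Char :=
  if k % 3 = 0 then ['g', 'f'] else if k % 3 = 1 then ['p', 'f'] else ['c', 'f']

def rowF : Nat → List Char
  | 0 => []
  | k + 1 => rowF k ++ cellN k

-- the repeated pattern
def flatRep (m : Nat) : List Char := (List.replicate m ['g', 'f', 'p', 'f', 'c', 'f']).flatten

lemma join_nil_flatten (xs : List (List Char)) : PySem.Chars.join [] xs = xs.flatten := by
  induction xs with
  | nil => rfl
  | cons a t ih =>
    cases t with
    | nil => simp [PySem.Chars.join_singleton]
    | cons b r => rw [PySem.Chars.join_cons_cons]; simp_all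

lemma flatRep_get (m j : Nat) (hj : j < 6 * m) :
    (flatRep m)[j]? = (['g', 'f', 'p', 'f', 'c', 'f'] : List Char)[j % 6]? := by
  induction m generalizing j with
  | zero => omega
  | succ m ih =>
    have hrep : flatRep (m + 1) = ['g', 'f', 'p', 'f', 'c', 'f'] ++ flatRep m := by
      simp [flatRep, List.replicate_succ]
    rw [hrep]
    by_cases h6 : j < 6
    · rw [List.getElem?_append_left (by simpa using h6)]
      congr 1; omega
    · rw [List.getElem?_append_right (by simp; omega)]
      have := ih (j - 6) (by omega)
      simp only [List.length_cons, List.length_nil] at *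
      rw [show j - (0+1+1+1+1+1+1) = j - 6 by omega, this]
      congr 1; omega

lemma rowF_eq_take (k m : Nat) (hk : k ≤ 3 * m) :
    rowF k = (flatRep m).take (2 * k) := by
  induction k with
  | zero => simp [rowF]
  | succ k ih =>
    have h1 : 2 * k < 6 * m := by omega
    have h2 : 2 * k + 1 < 6 * m := by omega
    have e1 := flatRep_get m (2 * k) h1
    have e2 := flatRep_get m (2 * k + 1) h2
    rw [rowF, ih (by omega),
      show 2 * (k + 1) = (2 * k + 1) + 1 by omega,
      List.take_add_one, List.take_add_one, e1, e2]
    rcases (show k % 3 = 0 ∨ k % 3 = 1 ∨ k % 3 = 2 by omega) with h | h | h <;>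
      · rw [show (2 * k) % 6 = 2 * (k % 3) by omega,
          show (2 * k + 1) % 6 = 2 * (k % 3) + 1 by omega, h]
        simp [cellN, h]

-- A's inner for-loop builds rowF
lemma foldl_cell_eq (k : Nat) (s : List Char) :
    (PySem.List.pyRange 0 (k : Int) 1).foldl spiralaCell s = s ++ rowF k := by
  induction k generalizing s with
  | zero => simp [rowF]
  | succ k ih =>
    rw [PySem.List.pyRange_zero_natCast, List.range_succ, List.map_append,
      List.foldl_append, ← PySem.List.pyRange_zero_natCast, ih]
    simp only [List.map_cons, List.map_nil, List.foldl_cons, List.foldl_nil]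
    rw [rowF]
    have hm : PySem.Int.mod (k : Int) 3 = ((k % 3 : Nat) : Int) := by
      exact_mod_cast PySem.Int.mod_natCast k 3
    rcases (show k % 3 = 0 ∨ k % 3 = 1 ∨ k % 3 = 2 by omega) with h | h | h <;>
      · simp only [spiralaCell, hm, h]
        norm_num [cellN, h]

-- B's row equals A's row followed by 'r'
lemma rowB_eq (k : Nat) : spiralaRowB (k : Int) = rowF k ++ ['r'] := by
  have h0 : (0 : Int) ≤ 2 * (k : Int) := by positivity
  rw [spiralaRowB, PySem.List.slice_to _ h0,
    show ((2 * (k : Int)).toNat) = 2 * k by omega,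
    show ((k : Int)).toNat = k by omega]
  rw [rowF_eq_take k k (by omega)]
  rfl

-- one unfolding of A's while loop, on Nat-cast arguments
lemma go_succ (m : Nat) (s : List Char) :
    spiralaGo ((m + 1 : Nat) : Int) s = spiralaGo (m : Int) (s ++ rowF (m + 1) ++ ['r']) := by
  rw [spiralaGo, dif_pos (show (0 : Int) < ((m + 1 : Nat) : Int) by positivity)]
  rw [show (((m + 1 : Nat) : Int) - 1) = (m : Int) by push_cast; ring, foldl_cell_eq (m + 1) s]

-- the accumulator of A's loop factors out
lemma go_acc (m : Nat) (s : List Char) :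
    spiralaGo (m : Int) s = s ++ spiralaGo (m : Int) [] := by
  induction m generalizing s with
  | zero =>
    have h0 : ∀ t : List Char, spiralaGo (((0 : Nat) : Int)) t = t := by
      intro t; rw [spiralaGo]; simp
    rw [h0, h0]
    simp
  | succ m ihm =>
    rw [go_succ m s, go_succ m [], ihm (s ++ rowF (m + 1) ++ ['r']), ihm ([] ++ rowF (m + 1) ++ ['r'])]
    simp

-- shifting the row index across range (k+1)
lemma map_shift (k : Nat) :
    (List.range (k + 1)).map (fun j => spiralaRowB (((k + 1 : Nat) : Int) - ((j : Nat) : Int)))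
      = spiralaRowB ((k + 1 : Nat) : Int)
        :: (List.range k).map (fun j => spiralaRowB ((k : Int) - ((j : Nat) : Int))) := by
  rw [List.range_succ_eq_map, List.map_cons, List.map_map,
    show (((k + 1 : Nat) : Int) - ((0 : Nat) : Int)) = ((k + 1 : Nat) : Int) by push_cast; ring]
  congr 1
  apply List.map_congr_left
  intro a ha
  simp only [Function.comp_apply]
  congr 1
  push_cast; ring

-- B's list of rows flattens to A's loop result
lemma alt_body (k : Nat) :
    ((PySem.List.pyRange 0 (k : Int) 1).map (fun j => spiralaRowB ((k : Int) - j))).flatten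
      = spiralaGo (k : Int) [] := by
  induction k with
  | zero =>
    have h0 : spiralaGo (((0 : Nat) : Int)) [] = [] := by
      rw [spiralaGo]; simp
    rw [h0]
    simp
  | succ k ih =>
    rw [go_succ k [], go_acc k ([] ++ rowF (k + 1) ++ ['r']), ← ih]
    rw [PySem.List.pyRange_zero_natCast (k + 1), List.map_map]
    simp only [Function.comp_def]
    rw [map_shift k, List.flatten_cons, rowB_eq (k + 1)]
    rw [PySem.List.pyRange_zero_natCast k, List.map_map]
    simp only [Function.comp_def]
    simp

-- ===== VERDICT (by name: the statement is the Claim_ definition above) =====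
theorem spirala_spec : Claim_equal_spirala := by
  intro n _
  unfold Spec_spirala spirala spirala_alt
  rw [join_nil_flatten]
  by_cases hn : 0 < n
  · have hk : n = ((n.toNat : Nat) : Int) := by omega
    rw [hk, alt_body n.toNat]
  · have h0 : (n - 0).toNat = 0 := by omega
    have h1 : PySem.List.pyRange 0 n 1 = [] := by
      rw [PySem.List.pyRange_one, h0]
      simp
    rw [spiralaGo, h1]
    simp [hn]
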